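-- pv_equiv track=rewrite | github.com/32blit/32blit-tools | src/ttblit/asset/raw.py | csv_to_data
-- ===== SOURCE A (Python) =====
-- def csv_to_data(input_data, base=10):
--     try:
--         input_data = input_data.decode('utf-8')
--     except AttributeError:
--         pass
--
--     input_data = input_data.strip()
--
--     # Replace '1, 2, 3' to '1,2,3', might as well do it here
--     input_data = input_data.replace(' ', '')
--
--     # Split out into rows on linebreak
--     input_data = input_data.split('\n')
--
--     # Split every row into columns on the comma
--     input_data = [row.split(',') for row in input_data]
--
--     # Flatten our rows/cols 2d array into a 1d array of bytes
--     # Might as well do the int conversion here, to save another loop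
--     input_data = [int(col, base) for row in input_data for col in row if col != '']
--
--     return input_data
-- ===== SOURCE B (Python) =====
-- def csv_to_data(input_data, base=10):
--     try:
--         input_data = input_data.decode('utf-8')
--     except AttributeError:
--         pass
--
--     # Single-pass character state machine: walk the stripped string once,
--     # skipping spaces, flushing the current token at each ',' or '\n'.
--     out = []
--     cur = ''
--     for ch in input_data.strip():
--         if ch == ' ':
--             continue
--         if ch == ',' or ch == '\n':
--             if cur != '':
--                 out.append(int(cur, base))
--             cur = ''
--         else:
--             cur += ch
--     if cur != '':
--         out.append(int(cur, base))
--     return out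
-- ===== Notes on version B (the rewrite author's own statement) =====
-- stated objective: simpler
-- what changed: Replaces A's staged tokenization (delete spaces via replace, split into lines, split each line on commas, nested flattening comprehension) with a single left-to-right character state machine that carries a current-token accumulator, skips spaces and flushes the token at each comma or newline; no split, no replace, no intermediate list-of-lists.
import Mathlib
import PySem

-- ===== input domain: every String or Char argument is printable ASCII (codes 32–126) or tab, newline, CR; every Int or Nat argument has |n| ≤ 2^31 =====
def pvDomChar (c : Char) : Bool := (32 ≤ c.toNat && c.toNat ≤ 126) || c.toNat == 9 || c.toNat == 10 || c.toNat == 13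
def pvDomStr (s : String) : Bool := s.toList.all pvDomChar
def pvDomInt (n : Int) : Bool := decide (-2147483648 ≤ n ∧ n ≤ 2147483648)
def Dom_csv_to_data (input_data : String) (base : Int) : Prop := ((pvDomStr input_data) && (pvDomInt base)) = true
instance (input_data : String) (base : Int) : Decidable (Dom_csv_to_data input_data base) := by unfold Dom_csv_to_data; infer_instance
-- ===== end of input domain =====

-- B replaces A's staged tokenization (space-replace, split into lines, split each line on commas,
-- nested comprehension) with a single-pass character state machine carrying a current-token
-- accumulator (simpler decomposition, one pass, no intermediate lists-of-lists).


-- ===== PORT A =====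
-- (the .decode('utf-8') try/except is a no-op for str input: AttributeError → pass;
--  int(col, base) is ofCharsBase?; where it is none Python raises ValueError — excluded by Pre_,
--  so the .getD 0 default is never read on admitted inputs)
def csv_to_data (input_data : String) (base : Int) : List Int :=
  let s := PySem.Chars.strip input_data.toList
  let s := PySem.Chars.replace s [' '] []
  let rows := PySem.Chars.splitOn s ['\n']
  let rows := rows.map (fun row => PySem.Chars.splitOn row [','])
  rows.flatMap (fun row =>
    (row.filter (fun col => decide (col ≠ []))).map
      (fun col => (PySem.Int.ofCharsBase? col base).getD 0))

-- ===== PORT B =====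
-- loop body of Source B's for-loop: state = (out, cur)
def pvStep (base : Int) (p : List Int × List Char) (ch : Char) : List Int × List Char :=
  if ch = ' ' then p
  else if ch = ',' ∨ ch = '\n' then
    (if p.2 ≠ [] then p.1 ++ [(PySem.Int.ofCharsBase? p.2 base).getD 0] else p.1, [])
  else (p.1, p.2 ++ [ch])

-- the final 'if cur != '': out.append(int(cur, base))'
def pvFlush (base : Int) (p : List Int × List Char) : List Int :=
  if p.2 ≠ [] then p.1 ++ [(PySem.Int.ofCharsBase? p.2 base).getD 0] else p.1

def csv_to_data_alt (input_data : String) (base : Int) : List Int :=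
  pvFlush base ((PySem.Chars.strip input_data.toList).foldl (pvStep base) ([], []))

-- ===== PRECONDITION & SPEC =====
-- Pre_: every nonempty comma/newline-separated token (after strip and space removal) parses as
-- an int in the given base — exactly the inputs where Python's int(col, base) raises no ValueError.
def Pre_csv_to_data (input_data : String) (base : Int) : Prop :=
  ∀ tok ∈ PySem.Chars.splitOn
      (PySem.Chars.replace (PySem.Chars.replace (PySem.Chars.strip input_data.toList) [' '] [])
        ['\n'] [','])
      [','],
    tok ≠ [] → (PySem.Int.ofCharsBase? tok base).isSome = true
instance (input_data : String) (base : Int) : Decidable (Pre_csv_to_data input_data base) := by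
  unfold Pre_csv_to_data; infer_instance

def pvWitness_csv_to_data : String × Int := ("1, 2, 3\n4,5,\n\n6", 10)

def Spec_csv_to_data (input_data : String) (base : Int) (out : List Int) : Prop := out = csv_to_data_alt input_data base
instance (input_data : String) (base : Int) (out : List Int) : Decidable (Spec_csv_to_data input_data base out) := by unfold Spec_csv_to_data; infer_instance

-- ===== CLAIM (what is proved, stated in full; the proofs are below) =====
def Claim_equal_csv_to_data : Prop := ∀ (input_data : String) (base : Int), Dom_csv_to_data input_data base → Pre_csv_to_data input_data base → Spec_csv_to_data input_data base (csv_to_data input_data base)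

-- ===== LEMMAS AND PROOFS =====

-- prepend a prefix onto the head piece of a split
def pvMapHead (p : List Char) : List (List Char) → List (List Char)
  | [] => [p]
  | h :: t => (p ++ h) :: t

theorem pvMapHead_nil (p : List Char) : pvMapHead p [] = [p] := rfl
theorem pvMapHead_cons (p h : List Char) (t : List (List Char)) :
    pvMapHead p (h :: t) = (p ++ h) :: t := rfl

theorem pvMapHead_ne_nil (p : List Char) (l : List (List Char)) : pvMapHead p l ≠ [] := by
  cases l <;> simp [pvMapHead_nil, pvMapHead_cons]

theorem pvMapHead_nil_id (l : List (List Char)) (h : l ≠ []) : pvMapHead [] l = l := by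
  cases l with
  | nil => exact absurd rfl h
  | cons a t => rw [pvMapHead_cons, List.nil_append]

theorem pvMapHead_append (p : List Char) (l m : List (List Char)) (h : l ≠ []) :
    pvMapHead p (l ++ m) = pvMapHead p l ++ m := by
  cases l with
  | nil => exact absurd rfl h
  | cons a t => rw [List.cons_append, pvMapHead_cons, pvMapHead_cons, List.cons_append]

theorem pvMapHead_pvMapHead (p q : List Char) (l : List (List Char)) :
    pvMapHead p (pvMapHead q l) = pvMapHead (p ++ q) l := by
  cases l with
  | nil => rfl
  | cons a t => simp [pvMapHead_cons, List.append_assoc]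

-- splitting on a single character, in direct structural form
def pvSplitChar (c : Char) : List Char → List (List Char)
  | [] => [[]]
  | x :: xs => if x = c then [] :: pvSplitChar c xs else pvMapHead [x] (pvSplitChar c xs)

theorem pvSplitChar_nil (c : Char) : pvSplitChar c [] = [[]] := rfl
theorem pvSplitChar_cons (c x : Char) (xs : List Char) :
    pvSplitChar c (x :: xs)
      = if x = c then [] :: pvSplitChar c xs else pvMapHead [x] (pvSplitChar c xs) := rfl

theorem pvSplitChar_ne_nil (c : Char) (l : List Char) : pvSplitChar c l ≠ [] := by
  cases l with
  | nil => simp [pvSplitChar_nil]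
  | cons x xs =>
    rw [pvSplitChar_cons]
    split
    · simp
    · exact pvMapHead_ne_nil _ _

theorem pvSplitOn_go_char (c : Char) :
    ∀ (fuel : Nat) (l cur : List Char) (acc : List (List Char)), l.length ≤ fuel →
      PySem.Chars.splitOn.go [c] fuel l cur acc
        = acc.reverse ++ pvMapHead cur.reverse (pvSplitChar c l) := by
  intro fuel
  induction fuel with
  | zero =>
    intro l cur acc h
    have hl : l = [] := by cases l <;> simp_all
    subst hl
    rw [PySem.Chars.splitOn.go.eq_1, pvSplitChar_nil, pvMapHead_cons]
    simp only [List.append_nil, List.reverse_cons]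
  | succ n ih =>
    intro l cur acc h
    cases l with
    | nil =>
      rw [PySem.Chars.splitOn.go.eq_def, pvSplitChar_nil, pvMapHead_cons]
      simp only [List.append_nil, List.reverse_cons]
    | cons x rest =>
      rw [PySem.Chars.splitOn.go.eq_def]
      simp only []
      rw [pvSplitChar_cons]
      by_cases hx : x = c
      · rw [if_pos (by simp [List.isPrefixOf, hx]), if_pos hx]
        simp only [List.length_cons, List.length_nil, Nat.zero_add, List.drop_succ_cons,
          List.drop_zero]
        rw [ih rest [] (cur.reverse :: acc) (by simpa using Nat.le_of_succ_le_succ h)]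
        cases hs : pvSplitChar c rest with
        | nil => exact absurd hs (pvSplitChar_ne_nil c rest)
        | cons a t =>
          rw [List.reverse_nil, pvMapHead_cons, pvMapHead_cons]
          simp only [List.nil_append, List.append_nil, List.reverse_cons, List.append_assoc,
            List.cons_append]
      · rw [if_neg (by simp [List.isPrefixOf]; exact fun h => hx h.symm), if_neg hx]
        rw [ih rest (x :: cur) acc (by simpa using Nat.le_of_succ_le_succ h)]
        cases hs : pvSplitChar c rest with
        | nil => exact absurd hs (pvSplitChar_ne_nil c rest)
        | cons a t =>
          rw [pvMapHead_cons, pvMapHead_cons, pvMapHead_cons]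
          simp only [List.reverse_cons, List.append_assoc, List.cons_append]

theorem pvSplitOn_char (c : Char) (l : List Char) :
    PySem.Chars.splitOn l [c] = pvSplitChar c l := by
  unfold PySem.Chars.splitOn
  rw [pvSplitOn_go_char c (l.length + 1) l [] [] (by omega)]
  cases hs : pvSplitChar c l with
  | nil => exact absurd hs (pvSplitChar_ne_nil c l)
  | cons a t =>
    rw [List.reverse_nil, List.reverse_nil, pvMapHead_cons]
    simp only [List.nil_append]

-- replace by the empty string = delete every occurrence
theorem pvReplace_go_del (c : Char) :
    ∀ (fuel : Nat) (l acc : List Char), l.length ≤ fuel →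
      PySem.Chars.replace.go [c] [] fuel l acc
        = acc.reverse ++ l.filter (fun x => x ≠ c) := by
  intro fuel
  induction fuel with
  | zero =>
    intro l acc h
    have hl : l = [] := by cases l <;> simp_all
    subst hl
    rw [PySem.Chars.replace.go.eq_def]
    simp only [List.filter_nil, List.append_nil]
  | succ n ih =>
    intro l acc h
    cases l with
    | nil =>
      rw [PySem.Chars.replace.go.eq_def]
      simp only [List.filter_nil, List.append_nil]
    | cons x rest =>
      rw [PySem.Chars.replace.go.eq_def]
      simp only []
      by_cases hx : x = c
      · rw [if_pos (by simp [List.isPrefixOf, hx])]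
        simp only [List.length_cons, List.length_nil, Nat.zero_add, List.drop_succ_cons,
          List.drop_zero, List.reverse_nil, List.nil_append]
        rw [ih rest acc (by simpa using Nat.le_of_succ_le_succ h)]
        rw [List.filter_cons, if_neg (by simp [hx])]
      · rw [if_neg (by simp [List.isPrefixOf]; exact fun h => hx h.symm)]
        rw [ih rest (x :: acc) (by simpa using Nat.le_of_succ_le_succ h)]
        rw [List.filter_cons, if_pos (by simp [hx])]
        simp only [List.reverse_cons, List.append_assoc, List.singleton_append]

theorem pvReplace_del (c : Char) (l : List Char) :
    PySem.Chars.replace l [c] [] = l.filter (fun x => x ≠ c) := by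
  unfold PySem.Chars.replace
  rw [if_neg (by simp)]
  rw [pvReplace_go_del c l.length l [] (le_refl _)]
  simp only [List.reverse_nil, List.nil_append]

-- splitting on either delimiter at once, structurally
def pvSplit2 : List Char → List (List Char)
  | [] => [[]]
  | x :: xs => if x = ',' ∨ x = '\n' then [] :: pvSplit2 xs else pvMapHead [x] (pvSplit2 xs)

theorem pvSplit2_nil : pvSplit2 [] = [[]] := rfl
theorem pvSplit2_cons (x : Char) (xs : List Char) :
    pvSplit2 (x :: xs)
      = if x = ',' ∨ x = '\n' then [] :: pvSplit2 xs else pvMapHead [x] (pvSplit2 xs) := rfl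

theorem pvSplit2_ne_nil (l : List Char) : pvSplit2 l ≠ [] := by
  cases l with
  | nil => simp [pvSplit2_nil]
  | cons x xs =>
    rw [pvSplit2_cons]
    split
    · simp
    · exact pvMapHead_ne_nil _ _

-- splitting on '\n' then on ',' and flattening = splitting on both at once
theorem pvSplit2_flatten (l : List Char) :
    (pvSplitChar '\n' l).flatMap (pvSplitChar ',') = pvSplit2 l := by
  induction l with
  | nil => simp [pvSplitChar_nil, pvSplit2_nil]
  | cons x xs ih =>
    rw [pvSplitChar_cons, pvSplit2_cons]
    by_cases hnl : x = '\n'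
    · rw [if_pos hnl, if_pos (Or.inr hnl), List.flatMap_cons, pvSplitChar_nil, ih]
      rfl
    · rw [if_neg hnl]
      cases hs : pvSplitChar '\n' xs with
      | nil => exact absurd hs (pvSplitChar_ne_nil _ _)
      | cons a t =>
        rw [hs] at ih
        rw [List.flatMap_cons] at ih
        rw [pvMapHead_cons, List.singleton_append, List.flatMap_cons, pvSplitChar_cons]
        by_cases hc : x = ','
        · rw [if_pos hc, if_pos (Or.inl hc), List.cons_append, ih]
        · rw [if_neg hc, if_neg (by tauto)]
          rw [← pvMapHead_append [x] _ _ (pvSplitChar_ne_nil _ _), ih]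

-- conversion of a token list: drop empties, parse the rest
def pvConv (base : Int) (ts : List (List Char)) : List Int :=
  (ts.filter (fun t => decide (t ≠ []))).map
    (fun t => (PySem.Int.ofCharsBase? t base).getD 0)

theorem pvConv_cons (base : Int) (t : List Char) (ts : List (List Char)) :
    pvConv base (t :: ts)
      = (if t ≠ [] then [(PySem.Int.ofCharsBase? t base).getD 0] else []) ++ pvConv base ts := by
  unfold pvConv
  rw [List.filter_cons]
  by_cases h : t = []
  · simp [h]
  · simp [h]

-- the scanner invariant: running Source B's loop from state (out, cur) over l and flushing
-- yields out plus the converted tokens of l with cur prepended to the first one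
theorem pvScan_inv (base : Int) (l : List Char) :
    ∀ (out : List Int) (cur : List Char),
      pvFlush base (l.foldl (pvStep base) (out, cur))
        = out ++ pvConv base (pvMapHead cur (pvSplit2 (l.filter (fun x => x ≠ ' ')))) := by
  induction l with
  | nil =>
    intro out cur
    simp only [List.foldl_nil, List.filter_nil, pvSplit2_nil, pvMapHead_cons, List.append_nil]
    rw [pvConv_cons]
    unfold pvFlush pvConv
    split_ifs with h <;> simp
  | cons x xs ih =>
    intro out cur
    rw [List.foldl_cons, List.filter_cons]
    by_cases hsp : x = ' '
    · rw [if_neg (by simp [hsp])]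
      have hstep : pvStep base (out, cur) x = (out, cur) := by
        unfold pvStep; rw [if_pos hsp]
      rw [hstep, ih]
    · rw [if_pos (by simp [hsp])]
      by_cases hdel : x = ',' ∨ x = '\n'
      · have hstep : pvStep base (out, cur) x
            = (if cur ≠ [] then out ++ [(PySem.Int.ofCharsBase? cur base).getD 0] else out, []) := by
          unfold pvStep; rw [if_neg hsp, if_pos hdel]
        rw [hstep, ih, pvSplit2_cons, if_pos hdel, pvMapHead_cons, List.append_nil,
          pvConv_cons, pvMapHead_nil_id _ (pvSplit2_ne_nil _)]
        split_ifs with h <;> simp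
      · have hstep : pvStep base (out, cur) x = (out, cur ++ [x]) := by
          unfold pvStep; rw [if_neg hsp, if_neg hdel]
        rw [hstep, ih, pvSplit2_cons, if_neg hdel, pvMapHead_pvMapHead]

-- ===== VERDICT (by name: the statement is the Claim_ definition above) =====
theorem csv_to_data_spec : Claim_equal_csv_to_data := by
  intro input_data base _ _
  unfold Spec_csv_to_data csv_to_data csv_to_data_alt
  simp only [pvSplitOn_char, pvReplace_del]
  rw [pvScan_inv]
  rw [pvMapHead_nil_id _ (pvSplit2_ne_nil _), List.nil_append]
  rw [show (fun row => (List.filter (fun col => decide (col ≠ [])) row).map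
        (fun col => (PySem.Int.ofCharsBase? col base).getD 0)) = pvConv base from rfl]
  rw [← pvSplit2_flatten]
  rw [List.flatMap_map]
  unfold pvConv
  rw [List.filter_flatMap, List.map_flatMap]
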